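-- pv_equiv track=rewrite | github.com/TarekSawara/PSCR-Parser | Code/AmbulanceAndEmergency/NumberOfBeneficiaries.py | none_replace
-- ===== SOURCE A (Python) =====
-- def none_replace(ls):
--     res = ls[:]
--     for r_i in range(len(ls), 0, -1):
--         for c_i in range(len(ls[r_i - 1])):  # skipp last column which is about total
--             cellVal = res[r_i - 1][c_i]
--             leftCellVal = res[r_i - 1][c_i - 1] if c_i > 0 else None
--             upCellVal = None
--             temp_r_i = r_i
--             while (temp_r_i > 1):
--                 upCellVal = res[temp_r_i - 2][c_i]
--                 if upCellVal:
--                     break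
--                 else:
--                     temp_r_i -= 1
--             res[r_i - 1][c_i] = cellVal if cellVal is not None else upCellVal if upCellVal else leftCellVal
--     return ls
-- ===== SOURCE B (Python) =====
-- def none_replace(ls):
--     # One top-down pass: 'above' keeps, per column, the nearest truthy value seen
--     # so far; each row is rebuilt left-to-right and written back in place
--     # (same in-place mutation of ls's rows as the original).
--     above = {}
--     for row in ls:
--         new = []
--         for c, cell in enumerate(row):
--             if cell is not None:
--                 new.append(cell)
--             else:
--                 up = above.get(c)
--                 new.append(up if up is not None else (new[c - 1] if c else None))
--         for c, cell in enumerate(row):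
--             if cell:
--                 above[c] = cell
--         row[:] = new
--     return ls
-- ===== Notes on version B (the rewrite author's own statement) =====
-- stated objective: faster
-- what changed: B makes one top-down pass keeping a per-column dict of the nearest truthy value seen so far, instead of rescanning the whole column upward for every cell as A does.
import Mathlib
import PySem

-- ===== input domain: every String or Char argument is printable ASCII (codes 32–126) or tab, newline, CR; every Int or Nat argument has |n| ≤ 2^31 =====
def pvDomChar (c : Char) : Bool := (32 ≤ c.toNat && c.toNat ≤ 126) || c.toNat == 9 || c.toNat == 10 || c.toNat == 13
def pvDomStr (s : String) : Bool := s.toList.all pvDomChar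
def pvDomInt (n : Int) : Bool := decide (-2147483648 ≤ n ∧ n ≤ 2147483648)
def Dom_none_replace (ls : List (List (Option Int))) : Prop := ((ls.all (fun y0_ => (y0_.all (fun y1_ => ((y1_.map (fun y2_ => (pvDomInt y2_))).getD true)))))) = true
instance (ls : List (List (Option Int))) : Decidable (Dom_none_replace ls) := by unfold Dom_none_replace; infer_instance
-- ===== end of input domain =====

-- B replaces A's per-cell upward column rescan by one top-down pass keeping, per column,
-- the nearest truthy value seen so far (objective: faster). Both A and B mutate ls's rows
-- in place in Python and return ls; the ports model the returned value.

-- ===== PORT A =====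

-- Python truthiness of a cell: not None and != 0
def truthyO (o : Option Int) : Bool :=
  match o with
  | some v => decide (v ≠ 0)
  | none => false

-- the 'while temp_r_i > 1' upward scan; returns the first truthy cell scanning rows
-- temp_r_i-2, temp_r_i-3, …, 0.  When the Python loop expires without break the leftover
-- upCellVal is falsy and the assignment falls through to leftCellVal exactly as if it
-- were None, so returning none there assigns the same value.
def upScan (res : List (List (Option Int))) (c : Nat) : Nat → Option Int
  | 0 => none
  | 1 => none
  | (t+2) =>
    let u := (res.getD t []).getD c none
    if truthyO u then u else upScan res c (t+1)

-- all row/cell indices A reads are non-negative and (inside Pre_) in range, so getD is exact;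
-- the only possibly out-of-range read is upScan's, excluded by Pre_ (Python raises IndexError).
def none_replace (ls : List (List (Option Int))) : List (List (Option Int)) :=
  (PySem.List.pyRange (ls.length : Int) 0 (-1)).foldl
    (fun res ri =>
      let r := ri.toNat
      (List.range (ls.getD (r - 1) []).length).foldl
        (fun res c =>
          let row := res.getD (r - 1) []
          let cellVal := row.getD c none
          let leftCellVal := if c > 0 then row.getD (c - 1) none else none
          let upCellVal := upScan res c r
          res.set (r - 1) (row.set c
            (if cellVal.isSome then cellVal
             else if truthyO upCellVal then upCellVal else leftCellVal)))
        res)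
    ls

-- ===== PORT B =====

def none_replace_alt (ls : List (List (Option Int))) : List (List (Option Int)) :=
  (ls.foldl
    (fun (st : PySem.Dict Int Int × List (List (Option Int))) (row : List (Option Int)) =>
      let new := (PySem.List.enumerate row 0).foldl
        (fun new p =>
          match p.2 with
          | some v => new ++ [some v]
          | none => new ++ [match st.1.get? p.1 with
              | some u => some u
              | none => if p.1 > 0 then PySem.List.pyGetD new (p.1 - 1) none else none])
        []
      let above := (PySem.List.enumerate row 0).foldl
        (fun ab p =>
          match p.2 with
          | some v => if v ≠ 0 then ab.insert p.1 v else ab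
          | none => ab)
        st.1
      (above, st.2 ++ [new]))
    (PySem.Dict.empty, [])).2

-- ===== PRECONDITION & SPEC =====
-- Pre_ excludes exactly the inputs where A's upward scan hits a row shorter than the
-- current column before finding a truthy cell: Python raises IndexError there.
def Pre_none_replace (ls : List (List (Option Int))) : Prop :=
  ∀ i ∈ List.range ls.length, ∀ c ∈ List.range (ls.getD i []).length, ∀ j ∈ List.range i,
    (ls.getD j []).length ≤ c →
    ∃ j' ∈ List.range i, j < j' ∧ c < (ls.getD j' []).length ∧
      truthyO ((ls.getD j' []).getD c none) = true
instance (ls : List (List (Option Int))) : Decidable (Pre_none_replace ls) := by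
  unfold Pre_none_replace; infer_instance

def pvWitness_none_replace : List (List (Option Int)) :=
  [[some 1, none], [none, some 2], [none, none]]

def Spec_none_replace (ls : List (List (Option Int))) (out : List (List (Option Int))) : Prop :=
  out = none_replace_alt ls
instance (ls : List (List (Option Int))) (out : List (List (Option Int))) : Decidable (Spec_none_replace ls out) := by
  unfold Spec_none_replace; infer_instance

-- ===== CLAIM (what is proved, stated in full; the proofs are below) =====
def Claim_equal_none_replace : Prop :=
  ∀ (ls : List (List (Option Int))), Dom_none_replace ls → Pre_none_replace ls →
    Spec_none_replace ls (none_replace ls)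

-- ===== LEMMAS AND PROOFS =====

-- last truthy cell of column c among rows (top-down), = first truthy scanning bottom-up
def lastTruthy (rows : List (List (Option Int))) (c : Nat) : Option Int :=
  rows.foldl (fun acc row => let u := row.getD c none; if truthyO u then u else acc) none

-- the common row-fixing pass: left-to-right, 'left' is the value just written
def fixGo (up : Nat → Option Int) (left : Option Int) (c : Nat) : List (Option Int) → List (Option Int)
  | [] => []
  | cell :: rest =>
    let v := match cell with
      | some x => some x
      | none => match up c with
        | some u => some u
        | none => left
    v :: fixGo up v (c + 1) rest

-- the reference result: rows fixed top-down against the ORIGINAL prefix above them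
def specGo (pref : List (List (Option Int))) : List (List (Option Int)) → List (List (Option Int))
  | [] => []
  | row :: rest => fixGo (lastTruthy pref) none 0 row :: specGo (pref ++ [row]) rest

-- matrix after A has processed rows k, k+1, …, len-1 (rows < k still original)
def mix (ls : List (List (Option Int))) (k : Nat) : List (List (Option Int)) :=
  ls.take k ++ specGo (ls.take k) (ls.drop k)

theorem lastTruthy_snoc (xs : List (List (Option Int))) (x : List (Option Int)) (c : Nat) :
    lastTruthy (xs ++ [x]) c =
      (let u := x.getD c none; if truthyO u then u else lastTruthy xs c) := by
  simp [lastTruthy, List.foldl_append]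

theorem lastTruthy_truthy (xs : List (List (Option Int))) (c : Nat) (v : Int)
    (h : lastTruthy xs c = some v) : v ≠ 0 := by
  unfold lastTruthy at h
  suffices H : ∀ (xs : List (List (Option Int))) (acc : Option Int),
      (∀ w : Int, acc = some w → w ≠ 0) →
      ∀ w : Int, xs.foldl (fun acc row => let u := row.getD c none; if truthyO u then u else acc) acc = some w → w ≠ 0 by
    exact H xs none (by simp) v h
  intro xs
  induction xs with
  | nil => intro acc hacc w hw; exact hacc w hw
  | cons r rs ih =>
    intro acc hacc w hw
    refine ih _ ?_ w hw
    intro w' hw'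
    cases hu : r.getD c none with
    | none => simp only [hu, truthyO] at hw'; simp at hw'; exact hacc w' hw'
    | some u =>
      by_cases hz : u = 0
      · simp only [hu, truthyO, hz] at hw'; simp at hw'; exact hacc w' hw'
      · simp only [hu, truthyO] at hw'
        simp [hz] at hw'
        omega

theorem upScan_congr (c : Nat) (t : Nat) (m₁ m₂ : List (List (Option Int)))
    (h : ∀ j, j + 2 ≤ t → m₁.getD j [] = m₂.getD j []) :
    upScan m₁ c t = upScan m₂ c t := by
  induction t using Nat.twoStepInduction with
  | zero => rfl
  | one => rfl
  | more t _ ih =>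
    simp only [upScan]
    rw [h t (by omega)]
    split
    · rfl
    · exact ih (fun j hj => h j (by omega))

theorem upScan_eq (ls : List (List (Option Int))) (c : Nat) :
    ∀ (k : Nat) (m : List (List (Option Int))), k ≤ ls.length →
      (∀ j, j < k → m.getD j [] = ls.getD j []) →
      upScan m c (k + 1) = lastTruthy (ls.take k) c := by
  intro k
  induction k with
  | zero => intro m _ _; simp [upScan, lastTruthy]
  | succ k ih =>
    intro m hk hm
    have htake : ls.take (k+1) = ls.take k ++ [ls.getD k []] := by
      have hlt : k < ls.length := by omega
      rw [List.take_succ]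
      simp [List.getElem?_eq_getElem hlt, List.getD, List.getElem?_eq_getElem hlt]
    rw [htake]
    show upScan m c (k + 2) = _
    simp only [upScan]
    rw [hm k (by omega)]
    rw [show lastTruthy (ls.take k ++ [ls.getD k []]) c =
      (let u := (ls.getD k []).getD c none; if truthyO u then u else lastTruthy (ls.take k) c) by
      simp [lastTruthy, List.foldl_append]]
    simp only []
    split
    · rfl
    · exact ih m (by omega) (fun j hj => hm j (by omega))

theorem specGo_length (pref rows : List (List (Option Int))) :
    (specGo pref rows).length = rows.length := by
  induction rows generalizing pref with
  | nil => rfl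
  | cons r rs ih => simp [specGo, ih]

theorem mix_length (ls : List (List (Option Int))) (k : Nat) :
    (mix ls k).length = ls.length := by
  simp [mix, specGo_length]
  omega

-- the in-place left-to-right row fix equals the rebuild fixGo
theorem small_fold (up : Nat → Option Int) :
    ∀ (m i : Nat) (row : List (Option Int)), i + m = row.length →
      (List.range' i m).foldl
        (fun row c => row.set c
          (if (row.getD c none).isSome then row.getD c none
           else match up c with
             | some u => some u
             | none => if c > 0 then row.getD (c - 1) none else none))
        row
      = row.take i ++ fixGo up (if i > 0 then row.getD (i - 1) none else none) i (row.drop i) := by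
  intro m
  induction m with
  | zero =>
    intro i row hlen
    simp only [List.range'_zero, List.foldl_nil]
    rw [List.take_of_length_le (by omega), List.drop_eq_nil_of_le (by omega)]
    simp [fixGo]
  | succ m ih =>
    intro i row hlen
    have hi : i < row.length := by omega
    rw [List.range'_succ, List.foldl_cons]
    set v : Option Int := (if (row.getD i none).isSome then row.getD i none
           else match up i with
             | some u => some u
             | none => if i > 0 then row.getD (i - 1) none else none) with hv
    rw [ih (i+1) (row.set i v) (by simp; omega)]
    have hset : row.set i v = row.take i ++ v :: row.drop (i+1) := by
      rw [List.set_eq_take_append_cons_drop]; simp [hi]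
    have hlen_take : (row.take i).length = i := by simp; omega
    have h1 : (row.set i v).take (i+1) = row.take i ++ [v] := by
      rw [hset, List.take_append]
      simp [hlen_take]
    have h2 : (row.set i v).drop (i+1) = row.drop (i+1) := by
      rw [List.drop_set]; simp
    have h3 : (row.set i v).getD i none = v := by
      simp [List.getD, List.getElem?_set_self hi]
    have h4 : row.drop i = row.getD i none :: row.drop (i+1) := by
      rw [List.drop_eq_getElem_cons hi]
      simp [List.getD, List.getElem?_eq_getElem hi]
    rw [h1, h2]
    have h5 : (if i + 1 > 0 then (row.set i v).getD (i + 1 - 1) none else none) = v := by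
      simpa using h3
    rw [h5, h4]
    simp only [fixGo]
    have hvv : (match row.getD i none with
      | some x => some x
      | none => match up i with
        | some u => some u
        | none => (if i > 0 then row.getD (i - 1) none else none)) = v := by
      rw [hv]
      rcases hx : row.getD i none with _ | x <;> simp [hx]
    rw [hvv]
    simp

-- the matrix-level inner fold only touches row k and reads rows < k
theorem matrix_fold (k : Nat) (nv : Option Int → List (Option Int) → Nat → Option Int) :
    ∀ (L : List Nat) (M : List (List (Option Int))), k < M.length →
      L.foldl
        (fun res c => res.set k ((res.getD k []).set c (nv (upScan res c (k+1)) (res.getD k []) c))) M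
      = M.set k (L.foldl (fun row c => row.set c (nv (upScan M c (k+1)) row c)) (M.getD k [])) := by
  intro L
  induction L with
  | nil =>
    intro M hk
    simp [List.getD, List.getElem?_eq_getElem hk, List.set_getElem_self]
  | cons c L ih =>
    intro M hk
    rw [List.foldl_cons, List.foldl_cons]
    set row₁ := (M.getD k []).set c (nv (upScan M c (k+1)) (M.getD k []) c) with hrow₁
    rw [ih (M.set k row₁) (by simpa using hk)]
    have hgd : (M.set k row₁).getD k [] = row₁ := by
      simp [List.getD, List.getElem?_set_self hk]
    have hup : ∀ c', upScan (M.set k row₁) c' (k+1) = upScan M c' (k+1) := by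
      intro c'
      apply upScan_congr
      intro j hj
      simp [List.getD, List.getElem?_set_ne (show k ≠ j by omega)]
    have hfold : (fun (row : List (Option Int)) c' => row.set c' (nv (upScan (M.set k row₁) c' (k+1)) row c'))
        = (fun row c' => row.set c' (nv (upScan M c' (k+1)) row c')) := by
      funext row c'; rw [hup]
    rw [hgd, hfold, List.set_set]

theorem outer_step (ls : List (List (Option Int))) (k : Nat) (hk : k < ls.length) :
    (List.range (ls.getD k []).length).foldl
      (fun res c =>
        let row := res.getD k []
        let cellVal := row.getD c none
        let leftCellVal := if c > 0 then row.getD (c - 1) none else none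
        let upCellVal := upScan res c (k + 1)
        res.set k (row.set c
          (if cellVal.isSome then cellVal
           else if truthyO upCellVal then upCellVal else leftCellVal)))
      (mix ls (k + 1))
    = mix ls k := by
  have hmlen : k < (mix ls (k + 1)).length := by rw [mix_length]; exact hk
  have hmix := matrix_fold k
      (fun u row c => if (row.getD c none).isSome then row.getD c none
        else if truthyO u then u else (if c > 0 then row.getD (c - 1) none else none))
      (List.range (ls.getD k []).length) (mix ls (k + 1)) hmlen
  rw [show (fun (res : List (List (Option Int))) (c : Nat) =>
        let row := res.getD k []
        let cellVal := row.getD c none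
        let leftCellVal := if c > 0 then row.getD (c - 1) none else none
        let upCellVal := upScan res c (k + 1)
        res.set k (row.set c
          (if cellVal.isSome then cellVal
           else if truthyO upCellVal then upCellVal else leftCellVal)))
      = (fun res c => res.set k ((res.getD k []).set c
          ((fun u row c => if (row.getD c none).isSome then row.getD c none
            else if truthyO u then u else (if c > 0 then row.getD (c - 1) none else none))
            (upScan res c (k+1)) (res.getD k []) c))) from rfl]
  rw [hmix]
  have htake : ls.take (k+1) = ls.take k ++ [ls.getD k []] := by
    rw [List.take_add_one]
    simp [List.getD, List.getElem?_eq_getElem hk]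
  have hrow : (mix ls (k + 1)).getD k [] = ls.getD k [] := by
    unfold mix
    rw [List.getD, List.getElem?_append_left (by simp; omega)]
    rw [List.getElem?_take]
    simp [List.getD, hk]
  have hup : ∀ c, upScan (mix ls (k + 1)) c (k + 1) = lastTruthy (ls.take k) c := by
    intro c
    refine upScan_eq ls c k (mix ls (k+1)) (by omega) ?_
    intro j hj
    unfold mix
    have h1 : j < (List.take (k+1) ls).length := by simp; omega
    rw [List.getD, List.getD, List.getElem?_append_left h1, List.getElem?_take, if_pos (by omega)]
  have hupt : ∀ c v, lastTruthy (ls.take k) c = some v → v ≠ 0 := fun c v h => lastTruthy_truthy _ c v h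
  have hfun : (fun (row : List (Option Int)) (c : Nat) => row.set c
        ((fun u (row : List (Option Int)) c => if (row.getD c none).isSome then row.getD c none
          else if truthyO u then u else (if c > 0 then row.getD (c - 1) none else none))
          (upScan (mix ls (k+1)) c (k+1)) row c))
      = (fun row c => row.set c
          (if (row.getD c none).isSome then row.getD c none
           else match lastTruthy (ls.take k) c with
             | some u => some u
             | none => if c > 0 then row.getD (c - 1) none else none)) := by
    funext row c
    rw [hup c]
    cases hlc : lastTruthy (ls.take k) c with
    | none => simp [truthyO]
    | some u => simp [truthyO, hupt c u hlc]
  rw [hrow, hfun]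
  rw [List.range_eq_range']
  rw [small_fold (fun c => lastTruthy (ls.take k) c) (ls.getD k []).length 0 (ls.getD k []) (by omega)]
  simp only [List.take_zero, List.drop_zero, List.nil_append, gt_iff_lt, Nat.lt_irrefl, if_false]
  -- now: (mix ls (k+1)).set k (fixGo (lastTruthy (ls.take k)) none 0 (ls.getD k [])) = mix ls k
  unfold mix
  rw [htake]
  have hlen_take : (ls.take k).length = k := by simp; omega
  rw [show ls.take k ++ [ls.getD k []] ++ specGo (ls.take k ++ [ls.getD k []]) (ls.drop (k+1))
      = ls.take k ++ (ls.getD k [] :: specGo (ls.take k ++ [ls.getD k []]) (ls.drop (k+1))) from by simp]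
  rw [List.set_append]
  rw [if_neg (by omega), hlen_take, Nat.sub_self]
  have hdrop : ls.drop k = ls.getD k [] :: ls.drop (k+1) := by
    rw [List.drop_eq_getElem_cons hk]
    simp [List.getD, List.getElem?_eq_getElem hk]
  rw [hdrop]
  simp [specGo]

theorem outer_fold (ls : List (List (Option Int))) :
    ∀ (k : Nat), k ≤ ls.length →
      (PySem.List.pyRange (k : Int) 0 (-1)).foldl
        (fun res ri =>
          let r := ri.toNat
          (List.range (ls.getD (r - 1) []).length).foldl
            (fun res c =>
              let row := res.getD (r - 1) []
              let cellVal := row.getD c none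
              let leftCellVal := if c > 0 then row.getD (c - 1) none else none
              let upCellVal := upScan res c r
              res.set (r - 1) (row.set c
                (if cellVal.isSome then cellVal
                 else if truthyO upCellVal then upCellVal else leftCellVal)))
            res)
        (mix ls k)
      = mix ls 0 := by
  intro k
  induction k with
  | zero =>
    intro _
    rw [PySem.List.pyRange_neg_one_eq_nil (by omega)]
    rfl
  | succ k ih =>
    intro hk
    rw [PySem.List.pyRange_neg_one_cons (by omega), List.foldl_cons]
    rw [show (((k+1 : Nat) : Int)) - 1 = ((k : Nat) : Int) from by push_cast; ring]
    simp only [Int.toNat_natCast, Nat.add_sub_cancel]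
    rw [outer_step ls k (by omega)]
    exact ih (by omega)

theorem main_A (ls : List (List (Option Int))) : none_replace ls = specGo [] ls := by
  have hlenmix : mix ls ls.length = ls := by
    unfold mix; simp [specGo]
  have h0 : mix ls 0 = specGo [] ls := by
    unfold mix; simp
  have h := outer_fold ls ls.length (le_refl _)
  rw [hlenmix, h0] at h
  unfold none_replace
  exact h

theorem fixGo_congr (up₁ up₂ : Nat → Option Int) (h : ∀ c, up₁ c = up₂ c) :
    ∀ (rows : List (Option Int)) (left : Option Int) (c : Nat),
      fixGo up₁ left c rows = fixGo up₂ left c rows := by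
  intro rows
  induction rows with
  | nil => intro _ _; rfl
  | cons x xs ih => intro left c; simp [fixGo, h c, ih]

theorem dict_skip (c : Int) :
    ∀ (row : List (Option Int)) (s : Int) (ab : PySem.Dict Int Int), c < s →
      ((PySem.List.enumerate row s).foldl
        (fun ab p =>
          match p.2 with
          | some v => if v ≠ 0 then ab.insert p.1 v else ab
          | none => ab) ab).get? c = ab.get? c := by
  intro row
  induction row with
  | nil => intro s ab _; simp [PySem.List.enumerate]
  | cons cell rest ih =>
    intro s ab hcs
    rw [PySem.List.enumerate_cons, List.foldl_cons]
    rw [ih (s+1) _ (by omega)]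
    cases cell with
    | none => rfl
    | some v =>
      by_cases hz : v = 0
      · simp [hz]
      · simp [hz, PySem.Dict.get?_insert_of_ne _ _ (show c ≠ s by omega)]

theorem dict_upd (c : Int) :
    ∀ (row : List (Option Int)) (s : Int) (ab : PySem.Dict Int Int), s ≤ c →
      ((PySem.List.enumerate row s).foldl
        (fun ab p =>
          match p.2 with
          | some v => if v ≠ 0 then ab.insert p.1 v else ab
          | none => ab) ab).get? c =
      (match row.getD (c - s).toNat none with
       | some v => if v ≠ 0 then some v else ab.get? c
       | none => ab.get? c) := by
  intro row
  induction row with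
  | nil => intro s ab _; simp [PySem.List.enumerate, List.getD]
  | cons cell rest ih =>
    intro s ab hsc
    rw [PySem.List.enumerate_cons, List.foldl_cons]
    by_cases hc : c = s
    · subst hc
      rw [dict_skip c rest (c+1) _ (by omega)]
      simp only [show (c - c).toNat = 0 from by omega]
      cases cell with
      | none => rfl
      | some v =>
        by_cases hz : v = 0
        · simp [hz, List.getD]
        · simp [hz, List.getD, PySem.Dict.get?_insert_self]
    · have hlt : s + 1 ≤ c := by omega
      have hnat : (c - s).toNat = (c - (s+1)).toNat + 1 := by omega
      have hgd : ∀ (x : Option Int) (n : Nat), (x :: rest).getD (n+1) none = rest.getD n none := by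
        intro x n; simp [List.getD]
      cases cell with
      | none =>
        dsimp only
        rw [ih (s+1) ab hlt, hnat, hgd]
      | some v =>
        by_cases hz : v = 0
        · dsimp only
          rw [if_neg (by omega), ih (s+1) ab hlt, hnat, hgd]
        · dsimp only
          rw [if_pos hz, ih (s+1) (ab.insert s v) hlt, hnat, hgd]
          have hne : (ab.insert s v).get? c = ab.get? c :=
            PySem.Dict.get?_insert_of_ne _ _ (show c ≠ s by omega)
          cases hrest : rest.getD (c - (s+1)).toNat none with
          | none => dsimp only; exact hne
          | some w => dsimp only; rw [hne]

theorem above_inv (pref : List (List (Option Int))) (row : List (Option Int))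
    (ab : PySem.Dict Int Int) (hinv : ∀ c : Nat, ab.get? (c : Int) = lastTruthy pref c) :
    ∀ c : Nat,
      ((PySem.List.enumerate row 0).foldl
        (fun ab p =>
          match p.2 with
          | some v => if v ≠ 0 then ab.insert p.1 v else ab
          | none => ab) ab).get? (c : Int) = lastTruthy (pref ++ [row]) c := by
  intro c
  rw [dict_upd (c : Int) row 0 ab (by omega)]
  rw [lastTruthy_snoc]
  simp only [show ((c : Int) - 0).toNat = c from by omega]
  cases hx : row.getD c none with
  | none => simpa using hinv c
  | some v =>
    by_cases hz : v = 0
    · simp [hz, truthyO, hinv c]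
    · simp [hz, truthyO]

theorem b_row (ab : PySem.Dict Int Int) :
    ∀ (row : List (Option Int)) (acc : List (Option Int)),
      (PySem.List.enumerate row (acc.length : Int)).foldl
        (fun new p =>
          match p.2 with
          | some v => new ++ [some v]
          | none => new ++ [match ab.get? p.1 with
              | some u => some u
              | none => if p.1 > 0 then PySem.List.pyGetD new (p.1 - 1) none else none])
        acc
      = acc ++ fixGo (fun c => ab.get? (c : Int))
          (if acc.length > 0 then acc.getD (acc.length - 1) none else none) acc.length row := by
  intro row
  induction row with
  | nil => intro acc; simp [PySem.List.enumerate, fixGo]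
  | cons cell rest ih =>
    intro acc
    rw [PySem.List.enumerate_cons, List.foldl_cons]
    have htail : ∀ v : Option Int,
        List.foldl
          (fun new p =>
            match p.2 with
            | some v => new ++ [some v]
            | none => new ++ [match ab.get? p.1 with
                | some u => some u
                | none => if p.1 > 0 then PySem.List.pyGetD new (p.1 - 1) none else none])
          (acc ++ [v]) (PySem.List.enumerate rest ((acc.length : Int) + 1))
        = acc ++ (v :: fixGo (fun c => ab.get? (c : Int)) v (acc.length + 1) rest) := by
      intro v
      rw [show ((acc.length : Int) + 1) = (((acc ++ [v]).length : Nat) : Int) from by simp]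
      rw [ih (acc ++ [v])]
      have hleft : (if (acc ++ [v]).length > 0 then (acc ++ [v]).getD ((acc ++ [v]).length - 1) none else none) = v := by
        simp [List.getD]
      rw [hleft]
      simp
    cases cell with
    | some x =>
      dsimp only
      rw [htail (some x)]
      simp [fixGo]
    | none =>
      dsimp only
      cases hu : ab.get? ((acc.length : Int)) with
      | some u =>
        dsimp only
        rw [htail (some u)]
        simp [fixGo, hu]
      | none =>
        dsimp only
        have hconv : (if ((acc.length : Int)) > 0 then PySem.List.pyGetD acc ((acc.length : Int) - 1) none else none)
            = (if acc.length > 0 then acc.getD (acc.length - 1) none else none) := by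
          by_cases h0 : acc.length = 0
          · simp [h0]
          · rw [if_pos (by omega), if_pos (by omega)]
            rw [show ((acc.length : Int) - 1) = (((acc.length - 1 : Nat) : Nat) : Int) from by omega]
            rw [PySem.List.pyGetD_natCast]
        rw [hconv, htail _]
        simp [fixGo, hu]

theorem b_outer (rows : List (List (Option Int))) :
    ∀ (pref : List (List (Option Int))) (ab : PySem.Dict Int Int) (out : List (List (Option Int))),
      (∀ c : Nat, ab.get? (c : Int) = lastTruthy pref c) →
      (rows.foldl
        (fun (st : PySem.Dict Int Int × List (List (Option Int))) (row : List (Option Int)) =>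
          let new := (PySem.List.enumerate row 0).foldl
            (fun new p =>
              match p.2 with
              | some v => new ++ [some v]
              | none => new ++ [match st.1.get? p.1 with
                  | some u => some u
                  | none => if p.1 > 0 then PySem.List.pyGetD new (p.1 - 1) none else none])
            []
          let above := (PySem.List.enumerate row 0).foldl
            (fun ab p =>
              match p.2 with
              | some v => if v ≠ 0 then ab.insert p.1 v else ab
              | none => ab)
            st.1
          (above, st.2 ++ [new]))
        (ab, out)).2
      = out ++ specGo pref rows := by
  induction rows with
  | nil =>
    intro pref ab out _
    simp [specGo]
  | cons row rest ih =>
    intro pref ab out hinv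
    rw [List.foldl_cons]
    dsimp only
    have hnew : (PySem.List.enumerate row 0).foldl
        (fun new p =>
          match p.2 with
          | some v => new ++ [some v]
          | none => new ++ [match ab.get? p.1 with
              | some u => some u
              | none => if p.1 > 0 then PySem.List.pyGetD new (p.1 - 1) none else none])
        []
        = fixGo (lastTruthy pref) none 0 row := by
      have hb := b_row ab row []
      simp only [List.length_nil, Nat.cast_zero] at hb
      rw [hb]
      simp
      exact fixGo_congr _ _ hinv row none 0
    rw [hnew]
    rw [ih (pref ++ [row]) _ (out ++ [fixGo (lastTruthy pref) none 0 row]) (above_inv pref row ab hinv)]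
    simp [specGo]

theorem main_B (ls : List (List (Option Int))) : none_replace_alt ls = specGo [] ls := by
  unfold none_replace_alt
  rw [b_outer ls [] PySem.Dict.empty []
    (fun c => by simp [PySem.Dict.get?_empty, lastTruthy])]
  simp

theorem main_eq (ls : List (List (Option Int))) : none_replace ls = none_replace_alt ls := by
  rw [main_A, main_B]

-- ===== VERDICT (by name: the statement is the Claim_ definition above) =====
theorem none_replace_spec : Claim_equal_none_replace := by
  intro ls _ _
  unfold Spec_none_replace
  exact main_eq ls
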